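-- pv_equiv track=rewrite | github.com/UKPLab/arxiv2025-meta-review-as-dialog | metrics/surface_level_metrics.py | turn_logic
-- ===== SOURCE A (Python) =====
-- def turn_logic(lines):
--     current_speaker = ""
--     turns = 0
--     for line in lines:
--         parts = line.split(":")
--         if len(parts) > 1:
--             speaker = parts[0]
--             text = parts[1]
--             if speaker != current_speaker:
--                 turns +=1
--                 current_speaker = speaker
--     return turns
-- ===== SOURCE B (Python) =====
-- def turn_logic(lines):
--     # Phase 1: the speaker of every line containing a colon, after the initial "" speaker.
--     speakers = [""] + [line.split(":")[0] for line in lines if len(line.split(":")) > 1]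
--     # Phase 2: count maximal runs of equal consecutive speakers by skipping whole runs;
--     # a turn change is exactly a run boundary, so turns = number of runs minus the initial run.
--     runs = 0
--     i = 0
--     while i < len(speakers):
--         runs += 1
--         start = i
--         i += 1
--         while i < len(speakers) and speakers[i] == speakers[start]:
--             i += 1
--     return runs - 1
-- ===== Notes on version B (the rewrite author's own statement) =====
-- stated objective: alternative
-- what changed: B reframes turn counting as run-length grouping: it first extracts the speaker list ('' prepended), then counts maximal runs of equal consecutive speakers with an outer loop that skips each whole run via an inner scan, returning runs-1, instead of A's single stateful scan comparing each speaker to a carried current_speaker.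
import Mathlib
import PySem

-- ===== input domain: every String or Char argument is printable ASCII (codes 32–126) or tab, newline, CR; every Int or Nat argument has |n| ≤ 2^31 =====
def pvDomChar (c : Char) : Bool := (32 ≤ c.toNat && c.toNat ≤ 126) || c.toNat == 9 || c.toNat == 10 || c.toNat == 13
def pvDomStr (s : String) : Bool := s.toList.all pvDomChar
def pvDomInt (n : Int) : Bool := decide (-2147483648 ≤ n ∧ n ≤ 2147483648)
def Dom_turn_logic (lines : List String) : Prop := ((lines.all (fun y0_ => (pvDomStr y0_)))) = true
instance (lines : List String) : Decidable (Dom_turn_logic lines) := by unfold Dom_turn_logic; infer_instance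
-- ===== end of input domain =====

-- B counts turn changes as run boundaries (runs of equal consecutive speakers, minus the initial run) instead of A's stateful scan; same cost, different algorithmic framing.

-- line.split(":") — sep is nonempty so split? is always `some`; getD [] is unreachable
def pvSplit (l : String) : List String := (PySem.Str.split? l ":").getD []

-- ===== PORT A =====
-- the body of A's for-loop, one step of the fold
def pvStep (st : String × Int) (line : String) : String × Int :=
  let parts := pvSplit line
  if 1 < parts.length then
    let speaker := parts.headD ""
    if speaker ≠ st.1 then (speaker, st.2 + 1) else st
  else st

def turn_logic (lines : List String) : Int :=
  (lines.foldl pvStep (("", (0 : Int)))).2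

-- ===== PORT B =====
-- B's outer while loop: each call handles one run, the inner skipping scan is the dropWhile
def pvRuns : List String → Nat
  | [] => 0
  | x :: xs => 1 + pvRuns (xs.dropWhile (fun y => y == x))
termination_by l => l.length
decreasing_by
  exact Nat.lt_succ_of_le (List.length_dropWhile_le _ _)

def turn_logic_alt (lines : List String) : Int :=
  let speakers := "" :: (lines.filter (fun l => 1 < (pvSplit l).length)).map
    (fun l => (pvSplit l).headD "")
  (pvRuns speakers : Int) - 1

-- ===== PRECONDITION & SPEC =====
def Spec_turn_logic (lines : List String) (out : Int) : Prop := out = turn_logic_alt lines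
instance (lines : List String) (out : Int) : Decidable (Spec_turn_logic lines out) := by unfold Spec_turn_logic; infer_instance

-- ===== CLAIM (what is proved, stated in full; the proofs are below) =====
def Claim_equal_turn_logic : Prop := ∀ (lines : List String), Dom_turn_logic lines → Spec_turn_logic lines (turn_logic lines)

-- ===== LEMMAS AND PROOFS =====

-- number of adjacent changes in cs :: ss (A's invariant quantity)
def pvCount (cs : String) : List String → Nat
  | [] => 0
  | s :: rest => (if s ≠ cs then 1 else 0) + pvCount s rest

def pvSpeakers (lines : List String) : List String :=
  (lines.filter (fun l => 1 < (pvSplit l).length)).map (fun l => (pvSplit l).headD "")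

lemma foldl_eq_count (lines : List String) : ∀ (cs : String) (t : Int),
    (lines.foldl pvStep ((cs, t))).2 = t + (pvCount cs (pvSpeakers lines) : Int) := by
  induction lines with
  | nil => intro cs t; simp [pvSpeakers, pvCount]
  | cons l rest ih =>
    intro cs t
    rw [List.foldl_cons]
    by_cases hc : 1 < (pvSplit l).length
    · have hb : (pvSplit l).headD "" = (pvSplit l).head?.getD "" := by
        cases pvSplit l <;> rfl
      have hsp : pvSpeakers (l :: rest) = (pvSplit l).head?.getD "" :: pvSpeakers rest := by
        simp [pvSpeakers, hc]
      by_cases hs : (pvSplit l).head?.getD "" = cs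
      · have hstep : pvStep (cs, t) l = (cs, t) := by
          simp [pvStep, hc, hs]
        rw [hstep, ih, hsp]
        simp [pvCount, hs]
      · have hstep : pvStep (cs, t) l = ((pvSplit l).head?.getD "", t + 1) := by
          simp [pvStep, hc, hs]
        rw [hstep, ih, hsp]
        simp only [pvCount, ne_eq, hs, not_false_eq_true, if_true]
        push_cast
        ring
    · have hsp : pvSpeakers (l :: rest) = pvSpeakers rest := by
        simp [pvSpeakers, hc]
      have hstep : pvStep (cs, t) l = (cs, t) := by simp [pvStep, hc]
      rw [hstep, ih, hsp]

-- dropping the leading copies of cs does not change the adjacent-change count from cs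
lemma count_dropWhile (cs : String) (ss : List String) :
    pvCount cs ss = pvCount cs (ss.dropWhile (fun y => y == cs)) := by
  induction ss with
  | nil => rfl
  | cons s rest ih =>
    by_cases h : s = cs
    · subst h
      simpa [pvCount, List.dropWhile] using ih
    · have hb : (s == cs) = false := by simp [h]
      simp [List.dropWhile, hb]

-- run counting = adjacent-change counting plus one (for the initial run)
lemma runs_eq_count (ss : List String) (cs : String) :
    pvRuns (cs :: ss) = pvCount cs ss + 1 := by
  induction hn : ss.length using Nat.strong_induction_on generalizing ss cs with
  | _ n ih =>
    rw [pvRuns, count_dropWhile cs ss]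
    cases hd : ss.dropWhile (fun y => y == cs) with
    | nil => simp [pvCount, pvRuns]
    | cons h t =>
      have hne : ¬ (h = cs) := by
        have := List.head?_dropWhile_not (fun y => y == cs) ss
        rw [hd] at this
        simpa using this
      have hlen : t.length < n := by
        have h1 : (ss.dropWhile (fun y => y == cs)).length ≤ ss.length :=
          List.length_dropWhile_le _ _
        rw [hd] at h1
        simp at h1
        omega
      have := ih t.length (hn ▸ hlen) t h rfl
      simp [pvCount, hne, this]
      omega

-- ===== VERDICT (by name: the statement is the Claim_ definition above) =====
theorem turn_logic_spec : Claim_equal_turn_logic := by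
  intro lines _
  unfold Spec_turn_logic turn_logic turn_logic_alt
  rw [foldl_eq_count]
  show (0 : Int) + (pvCount "" (pvSpeakers lines) : Int)
      = (pvRuns ("" :: pvSpeakers lines) : Int) - 1
  rw [runs_eq_count]
  push_cast
  ring
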